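-- pv_equiv track=rewrite | github.com/nhtlongcs/AIC2021-TheFirstSwans | postprocess/split_box_by_token.py | merge_number
-- ===== SOURCE A (Python) =====
-- def is_number(word):
--     for c in word:
--         if (c == '.'):
--             continue
--         if (ord(c) < ord('0') or ord(c) > ord('9')):
--             return False
--     return True
--
-- def merge_number(wsplit):
--     res = []
--     for w in wsplit:
--         if (len(res) > 0 and is_number(res[-1]) and is_number(w)):
--             res[-1] += w
--         else:
--             res.append(w)
--     return res
-- ===== SOURCE B (Python) =====
-- def is_number(word):
--     for c in word:
--         if (c == '.'):
--             continue
--         if (ord(c) < ord('0') or ord(c) > ord('9')):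
--             return False
--     return True
--
-- def merge_number(wsplit):
--     # Group-wise: find each maximal run of numeric tokens and join it at once,
--     # instead of mutating the last element of a growing result list.
--     res = []
--     i, n = 0, len(wsplit)
--     while i < n:
--         if is_number(wsplit[i]):
--             j = i + 1
--             while j < n and is_number(wsplit[j]):
--                 j += 1
--             res.append(''.join(wsplit[i:j]))
--             i = j
--         else:
--             res.append(wsplit[i])
--             i += 1
--     return res
-- ===== Notes on version B (the rewrite author's own statement) =====
-- stated objective: alternative
-- what changed: B scans for maximal runs of numeric tokens and joins each run at once, instead of A's per-element loop that repeatedly re-tests and mutates the last element of the result list.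
import Mathlib
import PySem

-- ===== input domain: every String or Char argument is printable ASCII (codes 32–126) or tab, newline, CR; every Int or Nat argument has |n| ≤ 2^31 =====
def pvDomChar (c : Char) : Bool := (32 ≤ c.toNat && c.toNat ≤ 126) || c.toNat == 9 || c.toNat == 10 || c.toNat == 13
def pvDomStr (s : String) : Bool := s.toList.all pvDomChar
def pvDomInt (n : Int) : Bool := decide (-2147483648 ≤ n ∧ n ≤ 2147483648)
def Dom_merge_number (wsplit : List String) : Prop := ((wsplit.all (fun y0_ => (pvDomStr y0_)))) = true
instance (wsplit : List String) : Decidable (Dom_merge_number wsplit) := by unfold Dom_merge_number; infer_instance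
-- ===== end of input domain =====

-- B joins each maximal run of numeric tokens at once (run detection), instead of A's
-- per-element loop mutating the last result element; objective: alternative decomposition.

-- ===== PORT A =====
-- is_number: loop over the characters, '.' skipped, any non-digit returns False
def isNumberChars : List Char → Bool
  | [] => true
  | c :: cs =>
    if c = '.' then isNumberChars cs
    else if c.toNat < '0'.toNat ∨ '9'.toNat < c.toNat then false
    else isNumberChars cs

def is_number (word : String) : Bool := isNumberChars word.toList

def mergeStep (res : List String) (w : String) : List String :=
  if 0 < res.length ∧ is_number (res.getLastD "") = true ∧ is_number w = true then
    res.dropLast ++ [res.getLastD "" ++ w]     -- res[-1] += w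
  else
    res ++ [w]                                  -- res.append(w)

def merge_number (wsplit : List String) : List String :=
  wsplit.foldl mergeStep []

-- ===== PORT B =====
-- ''.join, ported by hand (exact: concatenation of the strings in order)
def joinStrs : List String → String
  | [] => ""
  | s :: t => s ++ joinStrs t

def merge_number_alt : List String → List String
  | [] => []
  | w :: ws =>
    if is_number w = true then
      -- maximal numeric run starting at w: w :: ws.takeWhile is_number; join it, continue after it
      joinStrs (w :: ws.takeWhile (fun x => is_number x)) ::
        merge_number_alt (ws.dropWhile (fun x => is_number x))
    else
      w :: merge_number_alt ws
termination_by ws => ws.length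
decreasing_by
  · exact Nat.lt_succ_of_le (List.length_dropWhile_le _ _)
  · exact Nat.lt_succ_self _

-- ===== PRECONDITION & SPEC =====
def Spec_merge_number (wsplit : List String) (out : List String) : Prop := out = merge_number_alt wsplit
instance (wsplit : List String) (out : List String) : Decidable (Spec_merge_number wsplit out) := by unfold Spec_merge_number; infer_instance

-- ===== CLAIM (what is proved, stated in full; the proofs are below) =====
def Claim_equal_merge_number : Prop := ∀ (wsplit : List String), Dom_merge_number wsplit → Spec_merge_number wsplit (merge_number wsplit)

-- ===== LEMMAS AND PROOFS =====

-- concatenation of two numeric character lists is numeric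
theorem isNumberChars_append (a b : List Char) (ha : isNumberChars a = true)
    (hb : isNumberChars b = true) : isNumberChars (a ++ b) = true := by
  induction a with
  | nil => simpa using hb
  | cons c cs ih =>
    rw [isNumberChars.eq_2] at ha
    rw [List.cons_append, isNumberChars.eq_2]
    split_ifs at ha ⊢ with h1 h2
    · exact ih ha
    · exact ih ha

-- the accumulator's last element is absent or non-numeric
def lastNotNum (acc : List String) : Prop :=
  acc = [] ∨ is_number (acc.getLastD "") = false

theorem merge_main (xs : List String) :
    (∀ acc : List String, lastNotNum acc →
        xs.foldl mergeStep acc = acc ++ merge_number_alt xs) ∧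
    (∀ (acc : List String) (n : String), is_number n = true →
        xs.foldl mergeStep (acc ++ [n]) =
          acc ++ (n ++ joinStrs (xs.takeWhile (fun x => is_number x))) ::
            merge_number_alt (xs.dropWhile (fun x => is_number x))) := by
  induction xs with
  | nil =>
    constructor
    · intro acc _; rw [merge_number_alt]; simp
    · intro acc n _
      rw [List.takeWhile_nil, List.dropWhile_nil, merge_number_alt]
      simp [joinStrs]
  | cons w ws ih =>
    constructor
    · intro acc hacc
      by_cases hw : is_number w = true
      · have hstep : mergeStep acc w = acc ++ [w] := by
          unfold mergeStep
          rcases hacc with h | h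
          · subst h; simp
          · rw [if_neg]; rintro ⟨-, h2, -⟩; rw [h] at h2; cases h2
        rw [List.foldl_cons, hstep, ih.2 acc w hw]
        rw [merge_number_alt]
        simp [hw, joinStrs]
      · have hstep : mergeStep acc w = acc ++ [w] := by
          unfold mergeStep
          rw [if_neg]; rintro ⟨-, -, h3⟩; exact hw h3
        have hlast : lastNotNum (acc ++ [w]) := by
          right; simp; exact eq_false_of_ne_true hw
        rw [List.foldl_cons, hstep, ih.1 (acc ++ [w]) hlast]
        rw [merge_number_alt]
        simp [hw]
    · intro acc n hn
      by_cases hw : is_number w = true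
      · have hstep : mergeStep (acc ++ [n]) w = acc ++ [n ++ w] := by
          unfold mergeStep
          rw [if_pos]
          · simp
          · refine ⟨by simp, ?_, hw⟩
            simp [hn]
        have hnum : is_number (n ++ w) = true := by
          unfold is_number at *
          rw [String.toList_append]
          exact isNumberChars_append _ _ hn hw
        rw [List.foldl_cons, hstep, ih.2 acc (n ++ w) hnum]
        simp [hw, joinStrs, String.append_assoc]
      · have hstep : mergeStep (acc ++ [n]) w = (acc ++ [n]) ++ [w] := by
          unfold mergeStep
          rw [if_neg]; rintro ⟨-, -, h3⟩; exact hw h3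
        have hlast : lastNotNum ((acc ++ [n]) ++ [w]) := by
          right; simp; exact eq_false_of_ne_true hw
        rw [List.foldl_cons, hstep, ih.1 _ hlast]
        simp only [List.takeWhile_cons, List.dropWhile_cons]
        rw [if_neg hw, if_neg hw]
        rw [merge_number_alt]
        simp [hw, joinStrs]

-- ===== VERDICT (by name: the statement is the Claim_ definition above) =====
theorem merge_number_spec : Claim_equal_merge_number := by
  intro wsplit _
  unfold Spec_merge_number merge_number
  simpa using (merge_main wsplit).1 [] (Or.inl rfl)
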